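-- pv_equiv track=rewrite | github.com/ArnolFokam/NER-Annotations-Density-vs-Pre-trained-Models | ner/helpers.py | get_labels_position
-- ===== SOURCE A (Python) =====
-- def get_labels_position(labels):
--     label =  []
--     in_word = False
--     start_idx = -1
--
--     for i in range(len(labels)):
--
--         if labels[i].startswith('B-'):
--             if in_word is True:
--                 label.append((start_idx, i-1))
--
--             in_word = True
--             start_idx = i
--
--         elif labels[i] == 'O' and in_word == True:
--             label.append((start_idx, i - 1))
--             in_word = False
--
--     return label
-- ===== SOURCE B (Python) =====
-- def get_labels_position(labels):
--     n = len(labels)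
--     # one reverse scan: next_boundary[i] = smallest j > i with labels[j] a span
--     # boundary (starts with 'B-' or equals 'O'), or None if no such j exists
--     next_boundary = [None] * n
--     nb = None
--     for j in range(n - 1, -1, -1):
--         next_boundary[j] = nb
--         if labels[j].startswith('B-') or labels[j] == 'O':
--             nb = j
--     return [(i, next_boundary[i] - 1)
--             for i in range(n)
--             if labels[i].startswith('B-') and next_boundary[i] is not None]
-- ===== Notes on version B (the rewrite author's own statement) =====
-- stated objective: alternative
-- what changed: Replaces the stateful in_word/start_idx scan by a boundary-table approach: one reverse pass precomputes the next boundary (B- or O) after each index, then each B- position directly emits (i, next_boundary[i]-1), dropping a trailing unclosed entity because it has no following boundary.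
import Mathlib
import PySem

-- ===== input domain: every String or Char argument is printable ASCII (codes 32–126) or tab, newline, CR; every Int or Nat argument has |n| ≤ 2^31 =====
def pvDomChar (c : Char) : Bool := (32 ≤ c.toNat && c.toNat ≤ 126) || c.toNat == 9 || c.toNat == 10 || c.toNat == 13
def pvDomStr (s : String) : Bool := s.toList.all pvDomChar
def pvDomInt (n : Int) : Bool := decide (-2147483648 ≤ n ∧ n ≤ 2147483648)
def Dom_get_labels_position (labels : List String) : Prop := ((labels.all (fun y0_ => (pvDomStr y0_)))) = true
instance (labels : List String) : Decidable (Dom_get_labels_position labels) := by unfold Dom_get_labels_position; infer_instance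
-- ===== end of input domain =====

-- B replaces A's stateful in_word/start_idx scan by a precomputed next-boundary table
-- (one reverse pass), emitting (i, next_boundary[i]-1) at each B- position: alternative
-- decomposition, same O(n) cost.


-- ===== PORT A =====
def get_labels_position (labels : List String) : List (Int × Int) :=
  ((PySem.List.pyRange 0 (PySem.List.len labels) 1).foldl
    (fun (st : List (Int × Int) × Bool × Int) i =>
      if PySem.Str.startswith (PySem.List.pyGetD labels i "") "B-" then
        ((if st.2.1 then st.1 ++ [(st.2.2, i - 1)] else st.1), true, i)
      else if PySem.List.pyGetD labels i "" == "O" && st.2.1 then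
        (st.1 ++ [(st.2.2, i - 1)], false, st.2.2)
      else st)
    ([], false, -1)).1

-- ===== PORT B =====
def pvIsBoundary (l : String) : Bool := PySem.Str.startswith l "B-" || l == "O"

-- the reverse scan of Source B, as structural recursion from the right:
-- returns (next_boundary list for this suffix starting at index i, first boundary index ≥ i)
def pvBuildNB (i : Int) : List String → List (Option Int) × Option Int
  | [] => ([], none)
  | l :: rest =>
    let p := pvBuildNB (i + 1) rest
    (p.2 :: p.1, if pvIsBoundary l then some i else p.2)

def get_labels_position_alt (labels : List String) : List (Int × Int) :=
  (PySem.List.enumerate (labels.zip (pvBuildNB 0 labels).1) 0).filterMap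
    (fun p => if PySem.Str.startswith p.2.1 "B-" then p.2.2.map (fun j => (p.1, j - 1)) else none)

-- ===== PRECONDITION & SPEC =====
def Spec_get_labels_position (labels : List String) (out : List (Int × Int)) : Prop := out = get_labels_position_alt labels
instance (labels : List String) (out : List (Int × Int)) : Decidable (Spec_get_labels_position labels out) := by unfold Spec_get_labels_position; infer_instance

-- ===== CLAIM (what is proved, stated in full; the proofs are below) =====
def Claim_equal_get_labels_position : Prop := ∀ (labels : List String), Dom_get_labels_position labels → Spec_get_labels_position labels (get_labels_position labels)

-- ===== LEMMAS AND PROOFS =====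

-- common structural description of A's loop
def gSpec (i : Int) (inw : Bool) (start : Int) : List String → List (Int × Int)
  | [] => []
  | l :: rest =>
    if PySem.Str.startswith l "B-" then
      (if inw then [(start, i - 1)] else []) ++ gSpec (i + 1) true i rest
    else if l == "O" && inw then
      (start, i - 1) :: gSpec (i + 1) false start rest
    else gSpec (i + 1) inw start rest

-- structural description of B's comprehension
def sB (i : Int) : List String → List (Int × Int)
  | [] => []
  | l :: rest =>
    (if PySem.Str.startswith l "B-" then
      ((pvBuildNB (i + 1) rest).2.map (fun j => (i, j - 1))).toList
     else []) ++ sB (i + 1) rest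

-- A's fold over the enumerated suffix equals gSpec
theorem foldA_eq_gSpec (rest : List String) :
    ∀ (i : Int) (acc : List (Int × Int)) (inw : Bool) (start : Int),
    ((PySem.List.enumerate rest i).foldl
      (fun (st : List (Int × Int) × Bool × Int) (p : Int × String) =>
        if PySem.Str.startswith p.2 "B-" then
          ((if st.2.1 then st.1 ++ [(st.2.2, p.1 - 1)] else st.1), true, p.1)
        else if p.2 == "O" && st.2.1 then
          (st.1 ++ [(st.2.2, p.1 - 1)], false, st.2.2)
        else st)
      (acc, inw, start)).1 = acc ++ gSpec i inw start rest := by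
  induction rest with
  | nil => intro i acc inw start; simp [PySem.List.enumerate_nil, gSpec]
  | cons l rest ih =>
    intro i acc inw start
    rw [PySem.List.enumerate_cons, List.foldl_cons]
    by_cases hB : PySem.Str.startswith l "B-" = true
    · cases inw <;>
        · simp only [hB, reduceIte]
          rw [ih]
          clear ih
          simp_all [gSpec]
    · by_cases hO : (l == "O") = true
      · cases inw <;>
          · simp only [hB, hO, Bool.and_true, reduceIte]
            rw [ih]
            clear ih
            simp_all [gSpec]
      · cases inw <;>
          · simp only [hB, hO, Bool.and_true, reduceIte]
            rw [ih]
            clear ih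
            simp_all [gSpec]

-- B's filterMap over the enumerated suffix equals sB
theorem filtB_eq_sB (rest : List String) :
    ∀ (i : Int),
    (PySem.List.enumerate (rest.zip (pvBuildNB i rest).1) i).filterMap
      (fun p => if PySem.Str.startswith p.2.1 "B-" then p.2.2.map (fun j => (p.1, j - 1)) else none)
    = sB i rest := by
  induction rest with
  | nil => intro i; simp [pvBuildNB, PySem.List.enumerate_nil, sB]
  | cons l rest ih =>
    intro i
    simp only [pvBuildNB, List.zip_cons_cons, PySem.List.enumerate_cons, List.filterMap_cons, sB]
    by_cases hB : PySem.Str.startswith l "B-" = true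
    · simp only [hB, reduceIte]
      cases hnb : (pvBuildNB (i + 1) rest).2 <;>
        · simp only [hnb, Option.map_some, Option.map_none]
          rw [ih]
          clear ih
          simp_all
    · simp only [hB, reduceIte]
      rw [ih]
      clear ih
      simp_all

-- main bridge: gSpec equals (pending-open prefix) ++ sB
theorem gSpec_eq_sB (rest : List String) :
    ∀ (i : Int) (inw : Bool) (start : Int),
    gSpec i inw start rest =
      (if inw then ((pvBuildNB i rest).2.map (fun j => (start, j - 1))).toList else []) ++ sB i rest := by
  induction rest with
  | nil => intro i inw start; cases inw <;> simp [gSpec, sB, pvBuildNB]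
  | cons l rest ih =>
    intro i inw start
    by_cases hB : PySem.Chars.startswith l.toList ['B', '-'] = true
    · cases inw <;>
        simp [gSpec, sB, pvBuildNB, pvIsBoundary, hB, ih (i + 1) true i]
    · by_cases hO : l = "O"
      · have hOB : PySem.Chars.startswith ['O'] ['B', '-'] = false := by decide
        cases inw <;>
          simp [gSpec, sB, pvBuildNB, pvIsBoundary, hO, hOB, ih (i + 1) false start]
      · cases inw <;>
          simp [gSpec, sB, pvBuildNB, pvIsBoundary, hB, hO, ih (i + 1) false start,
            ih (i + 1) true start]

-- ===== VERDICT (by name: the statement is the Claim_ definition above) =====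
theorem get_labels_position_spec : Claim_equal_get_labels_position := by
  intro labels _
  unfold Spec_get_labels_position get_labels_position
  rw [show PySem.List.pyRange 0 (PySem.List.len labels) 1
        = (PySem.List.enumerate labels 0).map (·.1) from by
      simp [PySem.List.map_fst_enumerate]]
  rw [List.foldl_map]
  have hcongr : (PySem.List.enumerate labels 0).foldl
      (fun (st : List (Int × Int) × Bool × Int) (p : Int × String) =>
        if PySem.Str.startswith (PySem.List.pyGetD labels p.1 "") "B-" then
          ((if st.2.1 then st.1 ++ [(st.2.2, p.1 - 1)] else st.1), true, p.1)
        else if PySem.List.pyGetD labels p.1 "" == "O" && st.2.1 then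
          (st.1 ++ [(st.2.2, p.1 - 1)], false, st.2.2)
        else st) ([], false, -1)
    = (PySem.List.enumerate labels 0).foldl
      (fun (st : List (Int × Int) × Bool × Int) (p : Int × String) =>
        if PySem.Str.startswith p.2 "B-" then
          ((if st.2.1 then st.1 ++ [(st.2.2, p.1 - 1)] else st.1), true, p.1)
        else if p.2 == "O" && st.2.1 then
          (st.1 ++ [(st.2.2, p.1 - 1)], false, st.2.2)
        else st) ([], false, -1) := by
    apply PySem.List.foldl_congr_mem
    intro acc p hp
    rcases (PySem.List.mem_enumerate_iff _ _ _).1 hp with ⟨k, hk, rfl⟩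
    simp [PySem.List.pyGetD_natCast, hk]
  rw [hcongr]
  rw [foldA_eq_gSpec labels 0 [] false (-1)]
  rw [gSpec_eq_sB labels 0 false (-1)]
  unfold get_labels_position_alt
  rw [filtB_eq_sB labels 0]
  simp
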